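-- pv_equiv track=rewrite | github.com/CaringCaribou/caringcaribou | caringcaribou/modules/fuzzer.py | apply_fuzzed_data
-- ===== SOURCE A (Python) =====
-- def apply_fuzzed_data(initial_data, fuzzed_nibbles, bitmap):
--     """
--     Applies 'fuzzed_nibbles' on top of 'initial_data', for all indices where 'bitmap' is True.
--     Returns result as a list of bytes.
--
--     Example:
--     apply_fuzzed_data([0x2, 0x4, 0xA, 0xB], [0x5, 0xF], [False, True, True, False])
--     gives the following result:
--     [0x25, 0xFB]
--
--     :param initial_data: list of initial data nibbles
--     :param fuzzed_nibbles: list of nibbles to apply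
--     :param bitmap: list of bool values, indicating where to apply fuzzed nibbles
--     :return: list of bytes
--     """
--     fuzz_index = 0
--     result_bytes = []
--     for index in range(0, len(bitmap), 2):
--         # Apply fuzzed nibbles on top of initial data
--         if bitmap[index]:
--             high_nibble = fuzzed_nibbles[fuzz_index]
--             fuzz_index += 1
--         else:
--             high_nibble = initial_data[index]
--
--         if bitmap[index + 1]:
--             low_nibble = fuzzed_nibbles[fuzz_index]
--             fuzz_index += 1
--         else:
--             low_nibble = initial_data[index + 1]
--
--         current_byte = (high_nibble << 4) + low_nibble
--         result_bytes.append(current_byte)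
--     return result_bytes
-- ===== SOURCE B (Python) =====
-- def apply_fuzzed_data(initial_data, fuzzed_nibbles, bitmap):
--     it = iter(fuzzed_nibbles)
--     nibbles = [next(it) if fuzz_here else initial_data[i]
--                for i, fuzz_here in enumerate(bitmap)]
--     return [(hi << 4) + lo for hi, lo in zip(nibbles[0::2], nibbles[1::2])]
-- ===== Notes on version B (the rewrite author's own statement) =====
-- stated objective: simpler
-- what changed: A's fused loop that consumes two bitmap entries per iteration while threading a fuzz counter is split into two flat passes: one comprehension selecting every nibble (fuzzed via an iterator, else initial_data), then a zip of the even/odd slices pairing nibbles into bytes.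
import Mathlib
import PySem

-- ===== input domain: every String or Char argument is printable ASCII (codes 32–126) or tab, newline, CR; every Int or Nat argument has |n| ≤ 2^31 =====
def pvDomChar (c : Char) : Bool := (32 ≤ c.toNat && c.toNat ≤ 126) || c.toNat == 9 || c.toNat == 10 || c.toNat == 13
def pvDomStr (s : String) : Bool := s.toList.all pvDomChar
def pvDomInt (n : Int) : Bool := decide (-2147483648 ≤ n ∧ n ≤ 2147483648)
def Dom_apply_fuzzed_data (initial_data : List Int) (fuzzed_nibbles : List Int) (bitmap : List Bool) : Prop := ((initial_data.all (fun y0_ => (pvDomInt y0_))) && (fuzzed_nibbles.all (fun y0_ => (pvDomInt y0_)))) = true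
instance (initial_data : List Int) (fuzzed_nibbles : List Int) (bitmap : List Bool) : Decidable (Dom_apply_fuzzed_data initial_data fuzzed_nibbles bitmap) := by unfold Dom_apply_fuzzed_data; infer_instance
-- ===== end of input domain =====

-- B replaces A's fused two-nibbles-per-iteration loop with a flat nibble-selection pass followed by a
-- pairing pass (objective: simpler). Return-value equivalence; neither version mutates its arguments.

-- ===== PORT A =====
-- Loop body of A, as a named helper: state is (fuzz_index, result_bytes).
def pvStepA (initial_data : List Int) (fuzzed_nibbles : List Int) (bitmap : List Bool)
    (st : Int × List Int) (index : Int) : Int × List Int :=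
  let p1 : Int × Int :=
    if PySem.List.pyGetD bitmap index false
    then (PySem.List.pyGetD fuzzed_nibbles st.1 0, st.1 + 1)
    else (PySem.List.pyGetD initial_data index 0, st.1)
  let p2 : Int × Int :=
    if PySem.List.pyGetD bitmap (index + 1) false
    then (PySem.List.pyGetD fuzzed_nibbles p1.2 0, p1.2 + 1)
    else (PySem.List.pyGetD initial_data (index + 1) 0, p1.2)
  (p2.2, st.2 ++ [(p1.1 <<< (4 : Nat)) + p2.1])

-- Literal port of A: loop over range(0, len(bitmap), 2) carrying (fuzz_index, result_bytes);
-- the out-of-range indexing on which Python raises IndexError is totalised by pyGetD defaults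
-- and excluded via Pre_.
def apply_fuzzed_data (initial_data : List Int) (fuzzed_nibbles : List Int) (bitmap : List Bool) : List Int :=
  ((PySem.List.pyRange 0 (bitmap.length : Int) 2).foldl
    (pvStepA initial_data fuzzed_nibbles bitmap) ((0 : Int), ([] : List Int))).2

-- ===== PORT B =====
-- Port of Source B's selection comprehension: walks bitmap, initial_data (index i as structural position)
-- and the fuzzed-nibbles iterator in lockstep; headD totalises the indexing/next() excluded via Pre_.
def pvSelectNibbles : List Bool → List Int → List Int → List Int
  | [], _, _ => []
  | b :: bs, initial, fuzz =>
    if b then fuzz.headD 0 :: pvSelectNibbles bs initial.tail fuzz.tail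
    else initial.headD 0 :: pvSelectNibbles bs initial.tail fuzz

-- Port of Source B's zip(nibbles[0::2], nibbles[1::2]) pairing pass (a lone trailing nibble is
-- dropped, exactly as zip drops it).
def pvPairUp : List Int → List Int
  | h :: l :: rest => ((h <<< (4 : Nat)) + l) :: pvPairUp rest
  | _ => []

def apply_fuzzed_data_alt (initial_data : List Int) (fuzzed_nibbles : List Int) (bitmap : List Bool) : List Int :=
  pvPairUp (pvSelectNibbles bitmap initial_data fuzzed_nibbles)

-- ===== PRECONDITION & SPEC =====
-- Exactly the inputs on which Python A returns (otherwise it raises IndexError): even-length bitmap,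
-- enough fuzzed nibbles for the True positions, initial_data long enough for every False position.
def Pre_apply_fuzzed_data (initial_data : List Int) (fuzzed_nibbles : List Int) (bitmap : List Bool) : Prop :=
  bitmap.length % 2 = 0 ∧
  bitmap.count true ≤ fuzzed_nibbles.length ∧
  ∀ i < bitmap.length, bitmap.getD i true = false → i < initial_data.length
instance (initial_data : List Int) (fuzzed_nibbles : List Int) (bitmap : List Bool) : Decidable (Pre_apply_fuzzed_data initial_data fuzzed_nibbles bitmap) := by unfold Pre_apply_fuzzed_data; infer_instance

def pvWitness_apply_fuzzed_data : List Int × List Int × List Bool :=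
  ([2, 4, 10, 11], [5, 15], [false, true, true, false])

def Spec_apply_fuzzed_data (initial_data : List Int) (fuzzed_nibbles : List Int) (bitmap : List Bool) (out : List Int) : Prop := out = apply_fuzzed_data_alt initial_data fuzzed_nibbles bitmap
instance (initial_data : List Int) (fuzzed_nibbles : List Int) (bitmap : List Bool) (out : List Int) : Decidable (Spec_apply_fuzzed_data initial_data fuzzed_nibbles bitmap out) := by unfold Spec_apply_fuzzed_data; infer_instance

-- ===== CLAIM (what is proved, stated in full; the proofs are below) =====
def Claim_equal_apply_fuzzed_data : Prop := ∀ (initial_data : List Int) (fuzzed_nibbles : List Int) (bitmap : List Bool), Dom_apply_fuzzed_data initial_data fuzzed_nibbles bitmap → Pre_apply_fuzzed_data initial_data fuzzed_nibbles bitmap → Spec_apply_fuzzed_data initial_data fuzzed_nibbles bitmap (apply_fuzzed_data initial_data fuzzed_nibbles bitmap)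

-- ===== LEMMAS AND PROOFS =====

theorem pv_getD_tail {α : Type} (l : List α) (n : Nat) (d : α) :
    l.tail.getD n d = l.getD (n + 1) d := by
  cases l <;> rfl

-- the loop body at index 2k+2 over the full lists is the loop body at index 2k over the tails
theorem pv_step_shift (initial_data fuzzed_nibbles : List Int) (b1 b2 : Bool) (bs : List Bool)
    (st : Int × List Int) (k : Nat) :
    pvStepA initial_data fuzzed_nibbles (b1 :: b2 :: bs) st (2 * (k : Int) + 2)
      = pvStepA initial_data.tail.tail fuzzed_nibbles bs st (2 * (k : Int)) := by
  have e2 : (2 * (k : Int) + 2) + 1 = ((2 * k + 1 + 1 + 1 : Nat) : Int) := by push_cast; ring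
  have e1 : (2 * (k : Int) + 2) = ((2 * k + 1 + 1 : Nat) : Int) := by push_cast; ring
  have e4 : (2 * (k : Int)) + 1 = ((2 * k + 1 : Nat) : Int) := by push_cast; ring
  have e3 : (2 * (k : Int)) = ((2 * k : Nat) : Int) := by push_cast; ring
  unfold pvStepA
  rw [e2, e1, e4, e3]
  simp only [PySem.List.pyGetD_natCast, List.getD_cons_succ, pv_getD_tail]

-- the fold over the even indices equals select-then-pair
theorem pv_key (m : Nat) : ∀ (bitmap : List Bool) (initial_data fuzzed_nibbles : List Int)
    (res : List Int) (c : Nat), bitmap.length = 2 * m →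
    (((List.range m).map (fun k : Nat => 2 * (k : Int))).foldl
        (pvStepA initial_data fuzzed_nibbles bitmap) (((c : Nat) : Int), res)).2
      = res ++ pvPairUp (pvSelectNibbles bitmap initial_data (fuzzed_nibbles.drop c)) := by
  induction m with
  | zero =>
    intro bitmap initial_data fuzzed_nibbles res c h
    have : bitmap = [] := List.eq_nil_of_length_eq_zero (by omega)
    subst this
    simp [pvSelectNibbles, pvPairUp]
  | succ m ih =>
    intro bitmap initial_data fuzzed_nibbles res c h
    rcases bitmap with _ | ⟨b1, _ | ⟨b2, bs⟩⟩
    · simp at h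
    · simp at h; omega
    · have hbs : bs.length = 2 * m := by simp at h; omega
      rw [List.range_succ_eq_map, List.map_cons, List.foldl_cons, List.map_map]
      have hmap : ((fun k : Nat => (2 * (k : Int))) ∘ Nat.succ) = (fun k : Nat => 2 * (k : Int) + 2) := by
        funext k; simp [Nat.succ_eq_add_one]; ring
      rw [hmap]
      have hfold : ∀ (S : Int × List Int),
          (((List.range m).map (fun k : Nat => 2 * (k : Int) + 2)).foldl
              (pvStepA initial_data fuzzed_nibbles (b1 :: b2 :: bs)) S)
            = (((List.range m).map (fun k : Nat => 2 * (k : Int))).foldl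
              (pvStepA initial_data.tail.tail fuzzed_nibbles bs) S) := by
        intro S
        rw [List.foldl_map, List.foldl_map]
        congr 1
        funext st k
        exact pv_step_shift initial_data fuzzed_nibbles b1 b2 bs st k
      rw [hfold]
      rw [show (2 : Int) * ((0 : Nat) : Int) = 0 from by norm_num]
      cases b1 <;> cases b2
      · -- b1 = false, b2 = false
        have hstep : pvStepA initial_data fuzzed_nibbles (false :: false :: bs) (((c : Nat) : Int), res) 0
            = (((c : Nat) : Int), res ++ [(initial_data.getD 0 0 <<< (4 : Nat)) + initial_data.getD 1 0]) := by
          norm_num [pvStepA, PySem.List.pyGetD_ofNat']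
        rw [hstep, ih bs initial_data.tail.tail fuzzed_nibbles _ c hbs]
        simp [pvSelectNibbles, pvPairUp, List.head?_eq_getElem?]
      · -- b1 = false, b2 = true
        have hstep : pvStepA initial_data fuzzed_nibbles (false :: true :: bs) (((c : Nat) : Int), res) 0
            = (((c + 1 : Nat) : Int), res ++ [(initial_data.getD 0 0 <<< (4 : Nat)) + fuzzed_nibbles.getD c 0]) := by
          norm_num [pvStepA, PySem.List.pyGetD_ofNat', PySem.List.pyGetD_natCast]
        rw [hstep, ih bs initial_data.tail.tail fuzzed_nibbles _ (c + 1) hbs]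
        simp [pvSelectNibbles, pvPairUp, List.tail_drop, List.head?_eq_getElem?]
      · -- b1 = true, b2 = false
        have hstep : pvStepA initial_data fuzzed_nibbles (true :: false :: bs) (((c : Nat) : Int), res) 0
            = (((c + 1 : Nat) : Int), res ++ [(fuzzed_nibbles.getD c 0 <<< (4 : Nat)) + initial_data.getD 1 0]) := by
          norm_num [pvStepA, PySem.List.pyGetD_ofNat', PySem.List.pyGetD_natCast]
        rw [hstep, ih bs initial_data.tail.tail fuzzed_nibbles _ (c + 1) hbs]
        simp [pvSelectNibbles, pvPairUp, List.tail_drop, List.head?_eq_getElem?]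
      · -- b1 = true, b2 = true
        have hstep : pvStepA initial_data fuzzed_nibbles (true :: true :: bs) (((c : Nat) : Int), res) 0
            = (((c + 1 + 1 : Nat) : Int), res ++ [(fuzzed_nibbles.getD c 0 <<< (4 : Nat)) + fuzzed_nibbles.getD (c + 1) 0]) := by
          norm_num [pvStepA, PySem.List.pyGetD_ofNat', PySem.List.pyGetD_natCast]
          have hc := PySem.List.pyGetD_natCast fuzzed_nibbles (c + 1) (0 : Int)
          push_cast at hc
          simpa [List.getD] using hc
        rw [hstep, ih bs initial_data.tail.tail fuzzed_nibbles _ (c + 1 + 1) hbs]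
        simp [pvSelectNibbles, pvPairUp, List.tail_drop, List.head?_eq_getElem?]

-- pyRange 0 (2m) 2 is the doubled range
theorem pv_range_even (m : Nat) :
    PySem.List.pyRange 0 ((2 * m : Nat) : Int) 2 = (List.range m).map (fun k : Nat => 2 * (k : Int)) := by
  rw [PySem.List.pyRange_of_pos 0 ((2 * m : Nat) : Int) (by norm_num)]
  have hcount : (if (0 : Int) < ((2 * m : Nat) : Int)
      then ((((2 * m : Nat) : Int) - 0 + 2 - 1) / 2).toNat else 0) = m := by
    split_ifs with hpos <;> omega
  rw [hcount]
  simp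

-- ===== VERDICT (by name: the statement is the Claim_ definition above) =====
theorem apply_fuzzed_data_spec : Claim_equal_apply_fuzzed_data := by
  intro initial_data fuzzed_nibbles bitmap _ hpre
  obtain ⟨heven, -, -⟩ := hpre
  unfold Spec_apply_fuzzed_data apply_fuzzed_data apply_fuzzed_data_alt
  have hm : bitmap.length = 2 * (bitmap.length / 2) := by omega
  rw [show ((bitmap.length : Nat) : Int) = ((2 * (bitmap.length / 2) : Nat) : Int) from
    congrArg (fun n : Nat => (n : Int)) hm]
  rw [pv_range_even]
  have := pv_key (bitmap.length / 2) bitmap initial_data fuzzed_nibbles [] 0 hm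
  simpa using this
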